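-- pv_equiv track=rewrite | github.com/h2oai/enterprise-h2ogpte | rag_benchmark/test_benchmarks.py | group_and_sort_metadata
-- ===== SOURCE A (Python) =====
-- from collections import defaultdict
--
-- def group_and_sort_metadata(metadata_str_dict):
--     # Group by LLM
--     grouped_data = defaultdict(list)
--     for (test_name, llm), d in metadata_str_dict.items():
--         grouped_data[llm].append((test_name, d))
--
--     # Sort LLMs and test cases
--     sorted_data = sorted(grouped_data.items())
--     return [
--         (llm, sorted(test_cases, key=lambda x: x[0])) for llm, test_cases in sorted_data
--     ]
-- ===== SOURCE B (Python) =====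
-- def group_and_sort_metadata(metadata_str_dict):
--     # One global sort by (llm, test_name), then a single linear grouping pass.
--     items = sorted(metadata_str_dict.items(), key=lambda kv: (kv[0][1], kv[0][0]))
--     result = []
--     for (test_name, llm), d in items:
--         if result and result[-1][0] == llm:
--             result[-1][1].append((test_name, d))
--         else:
--             result.append((llm, [(test_name, d)]))
--     return result
-- ===== Notes on version B (the rewrite author's own statement) =====
-- stated objective: alternative
-- what changed: B drops the defaultdict accumulation and per-bucket sorts entirely: it sorts all items once by the composite key (llm, test_name) and then builds the groups in a single linear pass over the sorted list.
import Mathlib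
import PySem

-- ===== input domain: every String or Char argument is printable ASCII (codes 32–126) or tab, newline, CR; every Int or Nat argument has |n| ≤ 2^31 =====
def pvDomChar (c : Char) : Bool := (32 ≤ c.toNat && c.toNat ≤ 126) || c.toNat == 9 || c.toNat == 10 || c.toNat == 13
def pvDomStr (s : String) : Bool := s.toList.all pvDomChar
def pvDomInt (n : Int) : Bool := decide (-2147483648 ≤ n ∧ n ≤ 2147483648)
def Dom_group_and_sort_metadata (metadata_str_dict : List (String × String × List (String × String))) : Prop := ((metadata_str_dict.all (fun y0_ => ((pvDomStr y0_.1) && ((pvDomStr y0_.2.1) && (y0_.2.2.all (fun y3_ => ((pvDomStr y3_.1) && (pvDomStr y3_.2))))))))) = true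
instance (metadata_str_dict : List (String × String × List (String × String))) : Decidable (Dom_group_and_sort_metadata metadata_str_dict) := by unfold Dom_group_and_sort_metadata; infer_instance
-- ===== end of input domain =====

-- B replaces A's defaultdict bucket accumulation (then sorting the buckets) by ONE global sort on
-- the composite key (llm, test_name) followed by a single linear grouping pass.

-- ===== PORT A =====
-- A's dict is keyed by (test_name, llm); an element (t, l, d) of the association list is the item ((t, l), d).
def group_and_sort_metadata (metadata_str_dict : List (String × String × List (String × String))) : List (String × (List (String × (List (String × String))))) :=
  -- grouped_data = defaultdict(list); grouped_data[llm].append((test_name, d));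
  -- then sorted(grouped_data.items()): keyed here on the llm component only — exact, since dict
  -- keys are distinct so Python's tuple comparison never reaches the second components
  (PySem.List.sorted
      (metadata_str_dict.foldl
        (fun g e => g.modify e.2.1 [] (fun v => v ++ [(e.1, e.2.2)]))
        (PySem.Dict.empty : PySem.Dict String (List (String × List (String × String))))).items
      (fun p => p.1)).map
    (fun p => (p.1, PySem.List.sorted p.2 (fun x => x.1)))

-- ===== PORT B =====
-- one iteration of B's grouping loop: 'if result and result[-1][0] == llm: result[-1][1].append(…) else: result.append(…)'
def pvStep (res : List (String × List (String × List (String × String))))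
    (e : String × String × List (String × String)) :
    List (String × List (String × List (String × String))) :=
  match res.getLast? with
  | some last =>
    if last.1 == e.2.1 then res.dropLast ++ [(last.1, last.2 ++ [(e.1, e.2.2)])]
    else res ++ [(e.2.1, [(e.1, e.2.2)])]
  | none => res ++ [(e.2.1, [(e.1, e.2.2)])]

def group_and_sort_metadata_alt (metadata_str_dict : List (String × String × List (String × String))) : List (String × (List (String × (List (String × String))))) :=
  -- sorted(items, key=lambda kv: (kv[0][1], kv[0][0])): the tuple key is ported as the
  -- lexicographic order 'toLex' on String × String, which is exactly Python's tuple comparison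
  (PySem.List.sorted metadata_str_dict (fun e => toLex (e.2.1, e.1))).foldl pvStep []

-- ===== PRECONDITION & SPEC =====
-- Pre_ excludes association lists with a duplicate (test_name, llm) key: such a list does not
-- represent a Python dict (the function's actual argument type), so A's behaviour on it is undefined.
def Pre_group_and_sort_metadata (metadata_str_dict : List (String × String × List (String × String))) : Prop :=
  (metadata_str_dict.map (fun e => (e.1, e.2.1))).Nodup
instance (metadata_str_dict : List (String × String × List (String × String))) : Decidable (Pre_group_and_sort_metadata metadata_str_dict) := by unfold Pre_group_and_sort_metadata; infer_instance

def pvWitness_group_and_sort_metadata : (List (String × String × List (String × String))) :=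
  [("t2", "m1", [("k", "v")]), ("t1", "m1", []), ("t1", "m2", [])]

def Spec_group_and_sort_metadata (metadata_str_dict : List (String × String × List (String × String))) (out : List (String × (List (String × (List (String × String)))))) : Prop := out = group_and_sort_metadata_alt metadata_str_dict
instance (metadata_str_dict : List (String × String × List (String × String))) (out : List (String × (List (String × (List (String × String)))))) : Decidable (Spec_group_and_sort_metadata metadata_str_dict out) := by unfold Spec_group_and_sort_metadata; infer_instance

-- ===== CLAIM (what is proved, stated in full; the proofs are below) =====
def Claim_equal_group_and_sort_metadata : Prop := ∀ (metadata_str_dict : List (String × String × List (String × String))), Dom_group_and_sort_metadata metadata_str_dict → Pre_group_and_sort_metadata metadata_str_dict → Spec_group_and_sort_metadata metadata_str_dict (group_and_sort_metadata metadata_str_dict)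

-- ===== LEMMAS AND PROOFS =====

-- ---- A-side: characterise the dict the grouping loop builds ----

-- A's dict bucket for a given llm is the ordered sublist of its (test_name, d) pairs.
theorem pv_bucket (xs : List (String × String × List (String × String))) (l : String) :
    (xs.foldl (fun g e => g.modify e.2.1 [] (fun v => v ++ [(e.1, e.2.2)]))
        (PySem.Dict.empty : PySem.Dict String (List (String × List (String × String))))).getD l []
      = (xs.filter (fun e => e.2.1 == l)).map (fun e => (e.1, e.2.2)) := by
  have h := PySem.Dict.getD_foldl_modify_append
      (xs.map (fun e => (e.2.1, (e.1, e.2.2))))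
      (PySem.Dict.empty : PySem.Dict String (List (String × List (String × String)))) l
  rw [List.foldl_map] at h
  simpa [List.filter_map, Function.comp, List.map_map] using h

-- A's dict keys are the distinct llms in first-occurrence order.
theorem pv_keys (xs : List (String × String × List (String × String))) :
    (xs.foldl (fun g e => g.modify e.2.1 [] (fun v => v ++ [(e.1, e.2.2)]))
        (PySem.Dict.empty : PySem.Dict String (List (String × List (String × String))))).keys
      = PySem.Set.ofList (xs.map (fun e => e.2.1)) := by
  have h := PySem.Dict.keys_foldl_modify_key xs (fun e => e.2.1) []
      (fun _ e => fun v => v ++ [(e.1, e.2.2)])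
      (PySem.Dict.empty : PySem.Dict String (List (String × List (String × String))))
  simpa using h

theorem pv_keys_nodup (xs : List (String × String × List (String × String))) :
    (xs.foldl (fun g e => g.modify e.2.1 [] (fun v => v ++ [(e.1, e.2.2)]))
        (PySem.Dict.empty : PySem.Dict String (List (String × List (String × String))))).keys.Nodup :=
  PySem.Dict.nodup_keys_foldl_modify_key xs (fun e => e.2.1) []
    (fun _ e => fun v => v ++ [(e.1, e.2.2)]) _ PySem.Dict.nodup_keys_empty

-- A in canonical form: sorted distinct llms, each with its ordered bucket sorted by test name.
theorem pv_A_canon (xs : List (String × String × List (String × String))) :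
    group_and_sort_metadata xs
      = (PySem.List.sorted (PySem.Set.ofList (xs.map (fun e => e.2.1))) (fun x => x)).map
          (fun k => (k, PySem.List.sorted
              ((xs.filter (fun e => e.2.1 == k)).map (fun e => (e.1, e.2.2))) (fun x => x.1))) := by
  unfold group_and_sort_metadata
  set grouped := xs.foldl (fun g e => g.modify e.2.1 [] (fun v => v ++ [(e.1, e.2.2)]))
      (PySem.Dict.empty : PySem.Dict String (List (String × List (String × String)))) with hg
  set K := PySem.Set.ofList (xs.map (fun e => e.2.1)) with hK
  have hitems : grouped.items = K.map (fun k => (k, grouped.getD k [])) := by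
    rw [PySem.Dict.items_eq_map_keys grouped (pv_keys_nodup xs) [], pv_keys xs]
  have hsorted : PySem.List.sorted grouped.items (fun p => p.1)
      = (PySem.List.sorted K (fun x => x)).map (fun k => (k, grouped.getD k [])) := by
    apply PySem.List.sorted_eq_of_perm_of_pairwise_lt
    · rw [hitems]
      exact (PySem.List.sorted_perm K (fun x => x) false).map _
    · rw [List.pairwise_map]
      exact PySem.List.sorted_ofList_pairwise_lt (xs.map (fun e => e.2.1))
  rw [hsorted, List.map_map]
  apply List.map_congr_left
  intro k _
  simp only [Function.comp_apply]
  rw [pv_bucket xs k]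

-- ---- B-side: characterise the grouping pass over the sorted list ----

theorem pvStep_ne_nil (res : List (String × List (String × List (String × String))))
    (e : String × String × List (String × String)) : pvStep res e ≠ [] := by
  unfold pvStep
  cases res.getLast? with
  | none => simp
  | some last => by_cases h : (last.1 == e.2.1) = true <;> simp [h]

-- the grouping loop never touches groups before the last one
theorem pv_foldl_prefix (ys : List (String × String × List (String × String))) :
    ∀ (gs as : List (String × List (String × List (String × String)))), as ≠ [] →
      ys.foldl pvStep (gs ++ as) = gs ++ ys.foldl pvStep as := by
  induction ys with
  | nil => intro gs as _; simp
  | cons e t ih =>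
    intro gs as h
    simp only [List.foldl_cons]
    have hstep : pvStep (gs ++ as) e = gs ++ pvStep as e := by
      unfold pvStep
      rw [List.getLast?_append_of_ne_nil gs h]
      cases hl : as.getLast? with
      | none => exact absurd (List.getLast?_eq_none_iff.mp hl) h
      | some last =>
        by_cases hb : (last.1 == e.2.1) = true
        · simp [hb, List.dropLast_append_of_ne_nil h]
        · simp [hb]
    rw [hstep]
    exact ih gs (pvStep as e) (pvStep_ne_nil as e)

-- a run of equal llms at the front of the remaining input is absorbed into the last group
theorem pv_group_block (ys : List (String × String × List (String × String))) :
    ∀ (gs : List (String × List (String × List (String × String)))) (k : String)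
      (v : List (String × List (String × String))),
      ys.foldl pvStep (gs ++ [(k, v)])
        = (ys.dropWhile (fun x => x.2.1 == k)).foldl pvStep
            (gs ++ [(k, v ++ (ys.takeWhile (fun x => x.2.1 == k)).map (fun x => (x.1, x.2.2)))]) := by
  induction ys with
  | nil => intro gs k v; simp
  | cons e t ih =>
    intro gs k v
    by_cases h : (e.2.1 == k) = true
    · rw [List.takeWhile_cons, List.dropWhile_cons]
      simp only [h, if_true]
      simp only [List.foldl_cons]
      have hstep : pvStep (gs ++ [(k, v)]) e = gs ++ [(k, v ++ [(e.1, e.2.2)])] := by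
        unfold pvStep
        rw [List.getLast?_concat]
        have hk : (k == e.2.1) = true := by simp [eq_of_beq h]
        simp [hk, List.dropLast_concat]
      rw [hstep, ih gs k (v ++ [(e.1, e.2.2)])]
      simp
    · rw [List.takeWhile_cons, List.dropWhile_cons]
      simp only [h, if_false, Bool.false_eq_true]
      simp
-- a completed group is left behind when the next llm differs
theorem pv_cons_group (r : List (String × String × List (String × String)))
    (g : String × List (String × List (String × String)))
    (h : ∀ e', r.head? = some e' → g.1 ≠ e'.2.1) :
    r.foldl pvStep [g] = g :: r.foldl pvStep [] := by
  cases r with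
  | nil => rfl
  | cons e' t' =>
    have hne : g.1 ≠ e'.2.1 := h e' rfl
    simp only [List.foldl_cons]
    have h1 : pvStep [g] e' = [g] ++ [(e'.2.1, [(e'.1, e'.2.2)])] := by
      unfold pvStep
      simp [show (g.1 == e'.2.1) = false from beq_eq_false_iff_ne.mpr hne]
    have h2 : pvStep [] e' = [(e'.2.1, [(e'.1, e'.2.2)])] := rfl
    rw [h1, h2, pv_foldl_prefix t' [g] _ (by simp)]
    rfl

-- after dropping the first llm's block of a key-sorted list, every remaining llm is larger
theorem pv_drop_lt (e : String × String × List (String × String))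
    (t : List (String × String × List (String × String)))
    (hp : (e :: t).Pairwise (fun a b => a.2.1 ≤ b.2.1)) :
    ∀ x ∈ t.dropWhile (fun y => y.2.1 == e.2.1), e.2.1 < x.2.1 := by
  have hle : ∀ x ∈ t, e.2.1 ≤ x.2.1 := (List.pairwise_cons.mp hp).1
  have hpt : t.Pairwise (fun a b => a.2.1 ≤ b.2.1) := (List.pairwise_cons.mp hp).2
  cases hr : t.dropWhile (fun y => y.2.1 == e.2.1) with
  | nil => simp
  | cons e' t' =>
    have hsub : (e' :: t').Sublist t := hr ▸ List.dropWhile_sublist _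
    have hne : ¬ (e'.2.1 == e.2.1) = true := by
      have := List.head?_dropWhile_not (fun y => y.2.1 == e.2.1) t
      rw [hr] at this
      simpa using this
    have hlt : e.2.1 < e'.2.1 :=
      lt_of_le_of_ne (hle e' (hsub.subset (by simp))) (fun hEq => hne (by simp [hEq.symm]))
    have hp' : (e' :: t').Pairwise (fun a b => a.2.1 ≤ b.2.1) := hpt.sublist hsub
    intro x hx
    rcases List.mem_cons.mp hx with rfl | hx'
    · exact hlt
    · exact lt_of_lt_of_le hlt ((List.pairwise_cons.mp hp').1 x hx')

-- the grouping pass over any key-sorted list yields the sorted distinct llms with their blocks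
theorem pv_grouped : ∀ (n : Nat) (ys : List (String × String × List (String × String))),
    ys.length ≤ n → ys.Pairwise (fun a b => a.2.1 ≤ b.2.1) →
    ys.foldl pvStep []
      = (PySem.List.sorted (PySem.Set.ofList (ys.map (fun x => x.2.1))) (fun x => x)).map
          (fun k => (k, (ys.filter (fun x => x.2.1 == k)).map (fun x => (x.1, x.2.2)))) := by
  intro n
  induction n with
  | zero =>
    intro ys hlen _
    have : ys = [] := List.length_eq_zero_iff.mp (Nat.le_zero.mp hlen)
    subst this; rfl
  | succ m ih =>
    intro ys hlen hp
    cases ys with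
    | nil => rfl
    | cons e t =>
      have hle : ∀ x ∈ t, e.2.1 ≤ x.2.1 := (List.pairwise_cons.mp hp).1
      have hpt : t.Pairwise (fun a b => a.2.1 ≤ b.2.1) := (List.pairwise_cons.mp hp).2
      have htw_keys : ∀ x ∈ t.takeWhile (fun y => y.2.1 == e.2.1), x.2.1 = e.2.1 :=
        fun x hx => eq_of_beq (List.mem_takeWhile_imp (p := fun y => y.2.1 == e.2.1) (l := t) hx)
      have hr_lt : ∀ x ∈ t.dropWhile (fun y => y.2.1 == e.2.1), e.2.1 < x.2.1 := pv_drop_lt e t hp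
      have hr_pair : (t.dropWhile (fun y => y.2.1 == e.2.1)).Pairwise (fun a b => a.2.1 ≤ b.2.1) :=
        hpt.sublist (List.dropWhile_sublist _)
      have hr_len : (t.dropWhile (fun y => y.2.1 == e.2.1)).length ≤ m :=
        le_trans (List.length_dropWhile_le _ _) (Nat.le_of_succ_le_succ (by simpa using hlen))
      have hIH := ih (t.dropWhile (fun y => y.2.1 == e.2.1)) hr_len hr_pair
      -- a filter that is false on the whole leading block passes through to the remainder
      have hfilter : ∀ (q : (String × String × List (String × String)) → Bool),
          (∀ a ∈ t.takeWhile (fun y => y.2.1 == e.2.1), q a = false) →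
          t.filter q = (t.dropWhile (fun y => y.2.1 == e.2.1)).filter q := by
        intro q hq
        have h1 : t.filter q
            = (t.takeWhile (fun y => y.2.1 == e.2.1) ++ t.dropWhile (fun y => y.2.1 == e.2.1)).filter q := by
          rw [List.takeWhile_append_dropWhile]
        rw [h1, List.filter_append,
          List.filter_eq_nil_iff.mpr (fun a ha => by simp [hq a ha]), List.nil_append]
      -- LHS: peel the first block
      have hL : (e :: t).foldl pvStep []
          = (e.2.1, (e.1, e.2.2) :: (t.takeWhile (fun y => y.2.1 == e.2.1)).map (fun x => (x.1, x.2.2)))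
              :: (t.dropWhile (fun y => y.2.1 == e.2.1)).foldl pvStep [] := by
        simp only [List.foldl_cons]
        have h0 : pvStep [] e = [] ++ [(e.2.1, [(e.1, e.2.2)])] := rfl
        rw [h0, pv_group_block t [] e.2.1 [(e.1, e.2.2)]]
        simp only [List.nil_append, List.singleton_append]
        exact pv_cons_group _ _ (fun e' he' => by
          have : e' ∈ t.dropWhile (fun y => y.2.1 == e.2.1) := List.mem_of_mem_head? he'
          exact ne_of_lt (hr_lt e' this))
      -- RHS: peel the first llm from the sorted distinct llms
      have hkeys : PySem.List.sorted (PySem.Set.ofList ((e :: t).map (fun x => x.2.1))) (fun x => x)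
          = e.2.1 :: PySem.List.sorted
              (PySem.Set.ofList ((t.dropWhile (fun y => y.2.1 == e.2.1)).map (fun x => x.2.1))) (fun x => x) := by
        apply PySem.List.sorted_eq_of_perm_of_pairwise_lt
        · rw [List.perm_ext_iff_of_nodup]
          · intro a
            rw [List.mem_cons, PySem.List.mem_sorted, PySem.Set.mem_ofList, PySem.Set.mem_ofList]
            constructor
            · rintro (rfl | h)
              · exact List.mem_map.mpr ⟨e, by simp⟩
              · rcases List.mem_map.mp h with ⟨x, hx, rfl⟩
                exact List.mem_map.mpr
                  ⟨x, List.mem_cons_of_mem _ ((List.dropWhile_sublist _).subset hx), rfl⟩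
            · intro h
              rcases List.mem_map.mp h with ⟨x, hx, rfl⟩
              rcases List.mem_cons.mp hx with rfl | hxt
              · exact Or.inl rfl
              · have hx2 : x ∈ t.takeWhile (fun y => y.2.1 == e.2.1)
                    ++ t.dropWhile (fun y => y.2.1 == e.2.1) := by
                  rw [List.takeWhile_append_dropWhile]; exact hxt
                rcases List.mem_append.mp hx2 with h1 | h2
                · exact Or.inl (htw_keys x h1)
                · exact Or.inr (List.mem_map.mpr ⟨x, h2, rfl⟩)
          · rw [List.nodup_cons]
            refine ⟨fun hmem => ?_,
              ((PySem.List.sorted_perm _ _ false).nodup_iff).mpr (PySem.Set.nodup_ofList _)⟩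
            rw [PySem.List.mem_sorted, PySem.Set.mem_ofList] at hmem
            rcases List.mem_map.mp hmem with ⟨x, hx, hxe⟩
            exact (ne_of_lt (hr_lt x hx)) hxe.symm
          · exact PySem.Set.nodup_ofList _
        · rw [List.pairwise_cons]
          refine ⟨fun b hb => ?_, PySem.List.sorted_ofList_pairwise_lt _⟩
          rw [PySem.List.mem_sorted, PySem.Set.mem_ofList] at hb
          rcases List.mem_map.mp hb with ⟨x, hx, rfl⟩
          exact hr_lt x hx
      -- assemble
      rw [hL, hIH, hkeys, List.map_cons]
      congr 1
      · -- the first group is exactly the filter at the first llm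
        congr 1
        have h1 : ((e :: t).filter (fun x => x.2.1 == e.2.1))
            = e :: t.takeWhile (fun y => y.2.1 == e.2.1) := by
          rw [List.filter_cons_of_pos (by simp)]
          congr 1
          have h2 : t.filter (fun x => x.2.1 == e.2.1)
              = (t.takeWhile (fun y => y.2.1 == e.2.1) ++ t.dropWhile (fun y => y.2.1 == e.2.1)).filter
                  (fun x => x.2.1 == e.2.1) := by
            rw [List.takeWhile_append_dropWhile]
          rw [h2, List.filter_append,
            List.filter_eq_self.mpr (fun a ha => by simp [htw_keys a ha]),
            List.filter_eq_nil_iff.mpr (fun a ha => by simp [(ne_of_lt (hr_lt a ha)).symm]),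
            List.append_nil]
        rw [h1, List.map_cons]
      · -- the other groups filter identically from the full list and from the remainder
        apply List.map_congr_left
        intro k hk
        rw [PySem.List.mem_sorted, PySem.Set.mem_ofList] at hk
        rcases List.mem_map.mp hk with ⟨y, hy, rfl⟩
        have hke : e.2.1 ≠ y.2.1 := ne_of_lt (hr_lt y hy)
        congr 1
        rw [List.filter_cons_of_neg (by simpa using hke)]
        rw [hfilter (fun x => x.2.1 == y.2.1) (fun a ha => by
          simp only [beq_eq_false_iff_ne, ne_eq]
          rw [htw_keys a ha]
          simpa using hke)]

-- ===== VERDICT (by name: the statement is the Claim_ definition above) =====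
theorem group_and_sort_metadata_spec : Claim_equal_group_and_sort_metadata := by
  intro xs _ hpre
  unfold Pre_group_and_sort_metadata at hpre
  unfold Spec_group_and_sort_metadata group_and_sort_metadata_alt
  set ys := PySem.List.sorted xs (fun e => toLex (e.2.1, e.1)) with hys
  have hperm : ys.Perm xs := PySem.List.sorted_perm xs (fun e => toLex (e.2.1, e.1)) false
  have hlex : ys.Pairwise (fun a b => toLex (a.2.1, a.1) ≤ toLex (b.2.1, b.1)) :=
    PySem.List.sorted_pairwise xs (fun e => toLex (e.2.1, e.1))
  have hp : ys.Pairwise (fun a b => a.2.1 ≤ b.2.1) :=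
    hlex.imp (fun h => by
      rcases Prod.Lex.toLex_le_toLex.mp h with h1 | ⟨h1, _⟩
      · exact le_of_lt h1
      · exact le_of_eq h1)
  rw [pv_grouped ys.length ys le_rfl hp, pv_A_canon]
  -- distinct llms: first-occurrence order differs but the sorted lists agree
  have houter : PySem.List.sorted (PySem.Set.ofList (xs.map (fun e => e.2.1))) (fun x => x)
      = PySem.List.sorted (PySem.Set.ofList (ys.map (fun x => x.2.1))) (fun x => x) := by
    apply PySem.List.sorted_eq_sorted_of_perm _ _ _ (fun a b h => h)
    rw [List.perm_ext_iff_of_nodup (PySem.Set.nodup_ofList _) (PySem.Set.nodup_ofList _)]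
    intro a
    rw [PySem.Set.mem_ofList, PySem.Set.mem_ofList]
    exact ⟨fun h => (hperm.map (fun e => e.2.1)).mem_iff.mpr h,
           fun h => (hperm.map (fun e => e.2.1)).mem_iff.mp h⟩
  rw [houter]
  apply List.map_congr_left
  intro k _
  congr 1
  -- each group: sorting A's bucket by test name gives B's slice of the globally sorted list
  apply PySem.List.sorted_eq_of_perm_of_pairwise_lt
  · exact (hperm.filter _).map _
  · rw [List.pairwise_map]
    -- strictness: the (test_name, llm) keys are distinct (Pre_), so within one llm test names increase strictly
    have hnodup : (ys.map (fun e => (e.1, e.2.1))).Nodup :=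
      ((hperm.map (fun e => (e.1, e.2.1))).nodup_iff).mpr hpre
    have hne : ys.Pairwise (fun a b => (a.1, a.2.1) ≠ (b.1, b.2.1)) :=
      List.pairwise_map.mp hnodup
    have hcomb : (ys.filter (fun x => x.2.1 == k)).Pairwise
        (fun a b => (toLex (a.2.1, a.1) ≤ toLex (b.2.1, b.1)) ∧ (a.1, a.2.1) ≠ (b.1, b.2.1)) :=
      (hlex.and hne).filter _
    refine hcomb.imp_of_mem (fun {a b} ha hb hab => ?_)
    have hak : a.2.1 = k := by simpa using List.of_mem_filter ha
    have hbk : b.2.1 = k := by simpa using List.of_mem_filter hb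
    rcases Prod.Lex.toLex_le_toLex.mp hab.1 with h1 | ⟨_, h2⟩
    · rw [hak, hbk] at h1; exact absurd h1 (lt_irrefl k)
    · exact lt_of_le_of_ne h2 (fun hEq => hab.2 (by rw [hEq, hak, hbk]))
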